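-- pv_equiv track=rewrite | github.com/logan-robbins/parallel-decoder-transformer | src/parallel_decoder_transformer/evaluation/manifest_metrics.py | _build_histogram
-- ===== SOURCE A (Python) =====
-- from collections import Counter, defaultdict
-- from typing import Any, Dict, List, Mapping, Optional, Sequence, Tuple
--
-- def _build_histogram(lengths: Sequence[int], bins: Sequence[int]) -> Dict[str, int]:
--     if not lengths:
--         return {}
--     histogram: Dict[str, int] = {}
--     counts = Counter(lengths)
--     cumulative = 0
--     for edge in bins:
--         bucket_total = sum(count for length, count in counts.items() if length <= edge)
--         histogram[f"<= {edge}"] = bucket_total - cumulative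
--         cumulative = bucket_total
--     histogram[f"> {bins[-1]}"] = sum(count for length, count in counts.items() if length > bins[-1])
--     return histogram
-- ===== SOURCE B (Python) =====
-- def _count_le(sorted_xs, x):
--     # binary search: number of elements <= x in an ascending list (bisect_right)
--     lo, hi = 0, len(sorted_xs)
--     while lo < hi:
--         mid = (lo + hi) // 2
--         if sorted_xs[mid] <= x:
--             lo = mid + 1
--         else:
--             hi = mid
--     return lo
--
--
-- def _build_histogram(lengths, bins):
--     if not lengths:
--         return {}
--     sorted_lengths = sorted(lengths)
--     histogram = {}
--     cumulative = 0
--     for edge in bins: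
--         total = _count_le(sorted_lengths, edge)
--         histogram[f"<= {edge}"] = total - cumulative
--         cumulative = total
--     histogram[f"> {bins[-1]}"] = len(sorted_lengths) - _count_le(sorted_lengths, bins[-1])
--     return histogram
-- ===== Notes on version B (the rewrite author's own statement) =====
-- stated objective: faster
-- what changed: Replaces the per-edge scan over Counter items with one sort of the lengths plus a hand-written binary search (bisect_right) per bin edge.
import Mathlib
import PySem

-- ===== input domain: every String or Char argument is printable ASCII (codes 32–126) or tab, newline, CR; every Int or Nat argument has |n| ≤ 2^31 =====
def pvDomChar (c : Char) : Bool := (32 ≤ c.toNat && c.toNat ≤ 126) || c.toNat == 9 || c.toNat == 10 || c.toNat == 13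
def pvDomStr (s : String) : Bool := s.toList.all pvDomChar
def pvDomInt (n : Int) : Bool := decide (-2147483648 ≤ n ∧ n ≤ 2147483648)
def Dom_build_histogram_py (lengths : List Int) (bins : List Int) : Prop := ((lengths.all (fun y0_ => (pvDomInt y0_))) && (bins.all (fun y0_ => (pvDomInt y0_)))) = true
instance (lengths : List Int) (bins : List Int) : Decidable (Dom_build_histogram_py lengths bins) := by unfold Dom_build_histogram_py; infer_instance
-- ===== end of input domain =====

-- B replaces A's per-edge scan over the Counter's items by one sort of the lengths plus a
-- hand-written binary search per bin edge (objective: faster, asymptotic).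

-- ===== PORT A =====
-- literal port of A: Counter(lengths); per edge sum counts with length <= edge; dict in insertion order;
-- bins[-1] via pyGet? (none = IndexError, excluded by Pre_; the [] there is never claimed about)
def build_histogram_py (lengths : List Int) (bins : List Int) : List (String × Int) :=
  if lengths = [] then []
  else
    let counts : PySem.Dict Int Int := PySem.Dict.counter lengths
    let st := bins.foldl
      (fun (st : PySem.Dict String Int × Int) (edge : Int) =>
        let bucket_total : Int := ((counts.items.filter (fun q => q.1 ≤ edge)).map (fun q => q.2)).sum
        (st.1.insert ("<= " ++ PySem.Int.toStr edge) (bucket_total - st.2), bucket_total))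
      (PySem.Dict.empty, 0)
    match PySem.List.pyGet? bins (-1) with
    | none => []
    | some last =>
      (st.1.insert ("> " ++ PySem.Int.toStr last)
        ((counts.items.filter (fun q => q.1 > last)).map (fun q => q.2)).sum).items

-- ===== PORT B =====
-- port of Source B's _count_le: hand-written bisect_right while-loop, ported with a fuel counter
-- (xs.length ≥ hi - lo bounds the iterations; lo, hi are Python ints that stay ≥ 0, so Nat with
-- Nat division is exact; sorted_xs[mid] with 0 ≤ mid < hi ≤ len is List.getD, exact in range)
def count_le_loop (xs : List Int) (x : Int) : Nat → Nat → Nat → Nat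
  | 0, lo, _ => lo        -- fuel never runs out: the interval shrinks every iteration
  | fuel + 1, lo, hi =>
    if lo < hi then
      let mid := (lo + hi) / 2
      if xs.getD mid 0 ≤ x then count_le_loop xs x fuel (mid + 1) hi
      else count_le_loop xs x fuel lo mid
    else lo

def count_le (xs : List Int) (x : Int) : Nat := count_le_loop xs x xs.length 0 xs.length

def build_histogram_py_alt (lengths : List Int) (bins : List Int) : List (String × Int) :=
  if lengths = [] then []
  else
    let sorted_lengths := PySem.List.sorted lengths (fun y => y) false
    let st := bins.foldl
      (fun (st : PySem.Dict String Int × Int) (edge : Int) =>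
        let total : Int := (count_le sorted_lengths edge : Int)
        (st.1.insert ("<= " ++ PySem.Int.toStr edge) (total - st.2), total))
      (PySem.Dict.empty, 0)
    match PySem.List.pyGet? bins (-1) with
    | none => []
    | some last =>
      (st.1.insert ("> " ++ PySem.Int.toStr last)
        ((sorted_lengths.length : Int) - (count_le sorted_lengths last : Int))).items

-- ===== PRECONDITION & SPEC =====
-- Pre_ excludes only the inputs where A raises IndexError: nonempty lengths with empty bins (bins[-1]).
def Pre_build_histogram_py (lengths : List Int) (bins : List Int) : Prop :=
  lengths = [] ∨ bins ≠ []
instance (lengths : List Int) (bins : List Int) : Decidable (Pre_build_histogram_py lengths bins) := by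
  unfold Pre_build_histogram_py; infer_instance

def pvWitness_build_histogram_py : List Int × List Int := ([3, 1, 2, 2], [1, 2])

def Spec_build_histogram_py (lengths : List Int) (bins : List Int) (out : List (String × Int)) : Prop :=
  out = build_histogram_py_alt lengths bins
instance (lengths : List Int) (bins : List Int) (out : List (String × Int)) :
    Decidable (Spec_build_histogram_py lengths bins out) := by
  unfold Spec_build_histogram_py; infer_instance

-- ===== CLAIM (what is proved, stated in full; the proofs are below) =====
def Claim_equal_build_histogram_py : Prop :=
  ∀ (lengths : List Int) (bins : List Int), Dom_build_histogram_py lengths bins →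
    Pre_build_histogram_py lengths bins →
    Spec_build_histogram_py lengths bins (build_histogram_py lengths bins)

-- ===== LEMMAS AND PROOFS =====

-- a 0/1 indicator sums to 0 when the pivot is absent
lemma sum_indicator_zero (d : List Int) (a : Int) (h : a ∉ d) :
    (d.map (fun k => if a = k then (1 : Int) else 0)).sum = 0 := by
  induction d with
  | nil => simp
  | cons b t ih =>
    have hab : a ≠ b := fun e => h (e ▸ List.mem_cons_self)
    simp [hab, ih (fun m => h (List.mem_cons_of_mem _ m))]

-- sum of a 0/1 indicator over a nodup list
lemma sum_indicator (d : List Int) (hd : d.Nodup) (a : Int) :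
    (d.map (fun k => if a = k then (1 : Int) else 0)).sum = if a ∈ d then 1 else 0 := by
  induction d with
  | nil => simp
  | cons b t ih =>
    obtain ⟨hb, ht⟩ := List.nodup_cons.mp hd
    by_cases hba : a = b
    · subst hba
      simp [sum_indicator_zero t a hb]
    · simp [hba, ih ht]

-- summing xs-multiplicities over a filtered nodup superset of xs's elements counts countP
lemma sum_count_filter (xs d : List Int) (p : Int → Bool) (hd : d.Nodup)
    (hsub : ∀ y ∈ xs, y ∈ d) :
    ((d.filter p).map (fun k => (xs.count k : Int))).sum = (xs.countP p : Int) := by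
  induction xs with
  | nil => simp
  | cons a t ih =>
    have hsub' : ∀ y ∈ t, y ∈ d := fun y hy => hsub y (List.mem_cons_of_mem _ hy)
    have ha : a ∈ d := hsub a List.mem_cons_self
    have hmap : (d.filter p).map (fun k => ((a :: t).count k : Int))
        = (d.filter p).map (fun k => ((t.count k : Int) + (if a = k then (1 : Int) else 0))) := by
      apply List.map_congr_left
      intro k hk
      simp [List.count_cons]
    rw [hmap, PySem.List.sum_map_add_int, ih hsub',
        sum_indicator _ (hd.filter p) a]
    by_cases hpa : p a = true
    · have hmem : a ∈ d.filter p := List.mem_filter.mpr ⟨ha, hpa⟩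
      have hcp : (a :: t).countP p = t.countP p + 1 := by simp [hpa]
      rw [if_pos hmem, hcp]
      push_cast
      ring
    · have hmem : a ∉ d.filter p := by
        intro hc
        exact hpa (List.mem_filter.mp hc).2
      have hcp : (a :: t).countP p = t.countP p := by simp [hpa]
      rw [if_neg hmem, hcp]
      ring

-- A's per-edge scan over Counter items is countP
lemma counter_filter_sum (xs : List Int) (p : Int → Bool) :
    (((PySem.Dict.counter xs).items.filter (fun q => p q.1)).map (fun q => q.2)).sum
      = (xs.countP p : Int) := by
  rw [PySem.Dict.items_counter, List.filter_map, List.map_map]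
  have h1 : ((fun (q : Int × Int) => p q.1) ∘ fun k => (k, (xs.count k : Int))) = p := rfl
  have h2 : ((fun (q : Int × Int) => q.2) ∘ fun k => (k, (xs.count k : Int)))
      = fun k => (xs.count k : Int) := rfl
  rw [h1, h2]
  exact sum_count_filter xs _ p (PySem.Set.nodup_ofList xs)
    (fun y hy => (PySem.Set.mem_ofList xs y).mpr hy)

-- binary-search invariant
lemma count_le_loop_inv (xs : List Int) (x : Int) (hs : xs.Pairwise (· ≤ ·)) :
    ∀ (n lo hi : Nat), hi - lo ≤ n → lo ≤ hi → hi ≤ xs.length →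
      (∀ j (hj : j < xs.length), j < lo → xs[j] ≤ x) →
      (∀ j (hj : j < xs.length), hi ≤ j → x < xs[j]) →
      count_le_loop xs x n lo hi ≤ xs.length ∧
        (∀ j (hj : j < xs.length), j < count_le_loop xs x n lo hi → xs[j] ≤ x) ∧
        (∀ j (hj : j < xs.length), count_le_loop xs x n lo hi ≤ j → x < xs[j]) := by
  have hpg := List.pairwise_iff_getElem.mp hs
  intro n
  induction n with
  | zero =>
    intro lo hi hn hlh hhilen hbelow habove
    have heq : count_le_loop xs x 0 lo hi = lo := rfl
    rw [heq]
    exact ⟨by omega, fun j hj hjlo => hbelow j hj hjlo,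
      fun j hj hlej => habove j hj (by omega)⟩
  | succ n ih =>
    intro lo hi hn hlh hhilen hbelow habove
    by_cases h : lo < hi
    · have hmlo : lo ≤ (lo + hi) / 2 := by omega
      have hmhi : (lo + hi) / 2 < hi := by omega
      have hmlen : (lo + hi) / 2 < xs.length := by omega
      have hget : xs.getD ((lo + hi) / 2) 0 = xs[(lo + hi) / 2] :=
        List.getD_eq_getElem xs 0 hmlen
      have heq : count_le_loop xs x (n + 1) lo hi =
          if xs[(lo + hi) / 2] ≤ x then count_le_loop xs x n ((lo + hi) / 2 + 1) hi
          else count_le_loop xs x n lo ((lo + hi) / 2) := by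
        rw [count_le_loop]
        simp only [if_pos h, hget]
      by_cases hc : xs[(lo + hi) / 2] ≤ x
      · rw [heq, if_pos hc]
        apply ih ((lo + hi) / 2 + 1) hi (by omega) (by omega) hhilen ?_ habove
        intro j hj hjm
        rcases Nat.lt_or_ge j ((lo + hi) / 2) with hlt | hge
        · exact le_trans (hpg j ((lo + hi) / 2) hj hmlen hlt) hc
        · have : j = (lo + hi) / 2 := by omega
          subst this; exact hc
      · rw [heq, if_neg hc]
        have hcx : x < xs[(lo + hi) / 2] := not_le.mp hc
        apply ih lo ((lo + hi) / 2) (by omega) (by omega) (by omega) hbelow ?_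
        intro j hj hjm
        rcases Nat.lt_or_ge ((lo + hi) / 2) j with hlt | hge
        · exact lt_of_lt_of_le hcx (hpg ((lo + hi) / 2) j hmlen hj hlt)
        · have : j = (lo + hi) / 2 := by omega
          subst this; exact hcx
    · have heq : count_le_loop xs x (n + 1) lo hi = lo := by
        rw [count_le_loop]; simp [h]
      rw [heq]
      exact ⟨by omega, fun j hj hjlo => hbelow j hj hjlo,
        fun j hj hlej => habove j hj (by omega)⟩

lemma countP_of_boundary (xs : List Int) (p : Int → Bool) (r : Nat) (hr : r ≤ xs.length)
    (h1 : ∀ j (hj : j < xs.length), j < r → p xs[j])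
    (h2 : ∀ j (hj : j < xs.length), r ≤ j → p xs[j] = false) :
    xs.countP p = r := by
  conv_lhs => rw [← List.take_append_drop r xs]
  rw [List.countP_append]
  have htake : (xs.take r).countP p = (xs.take r).length := by
    rw [List.countP_eq_length]
    intro a hmem
    obtain ⟨i, hi, rfl⟩ := List.mem_iff_getElem.mp hmem
    have hil : i < xs.length := by
      have := hi; rw [List.length_take] at this; omega
    rw [List.getElem_take]
    apply h1 i hil
    have := hi; rw [List.length_take] at this; omega
  have hdrop : (xs.drop r).countP p = 0 := by
    rw [List.countP_eq_zero]
    intro a hmem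
    obtain ⟨i, hi, rfl⟩ := List.mem_iff_getElem.mp hmem
    have hil : r + i < xs.length := by
      have := hi; rw [List.length_drop] at this; omega
    rw [List.getElem_drop]
    simp [h2 (r + i) hil (by omega)]
  rw [htake, hdrop, List.length_take]
  omega

lemma count_le_sorted (lengths : List Int) (x : Int) :
    (count_le (PySem.List.sorted lengths (fun y => y) false) x : Int)
      = (lengths.countP (fun l => decide (l ≤ x)) : Int) := by
  set s := PySem.List.sorted lengths (fun y => y) false with hsdef
  have hpw : s.Pairwise (· ≤ ·) := by
    simpa using PySem.List.sorted_pairwise (xs := lengths) (key := fun y => y)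
  obtain ⟨hle, hb1, hb2⟩ := count_le_loop_inv s x hpw s.length 0 s.length (by omega)
    (by omega) le_rfl (fun j hj hj0 => absurd hj0 (by omega))
    (fun j hj hc => absurd hc (by omega))
  have hcp : s.countP (fun l => decide (l ≤ x)) = count_le s x := by
    apply countP_of_boundary s _ _ hle
    · intro j hj hjr
      simpa using hb1 j hj hjr
    · intro j hj hrj
      simpa [decide_eq_false_iff_not, not_le] using hb2 j hj hrj
  have hperm : s.Perm lengths := PySem.List.sorted_perm lengths (fun y => y) false
  rw [← hperm.countP_eq, hcp]


-- ===== VERDICT (by name: the statement is the Claim_ definition above) =====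
theorem build_histogram_py_spec : Claim_equal_build_histogram_py := by
  intro lengths bins hdom hpre
  unfold Spec_build_histogram_py build_histogram_py build_histogram_py_alt
  by_cases hl : lengths = []
  · simp [hl]
  · rw [if_neg hl, if_neg hl]
    have htot : ∀ e : Int,
        (((PySem.Dict.counter lengths).items.filter (fun q => q.1 ≤ e)).map (fun q => q.2)).sum
          = ((count_le (PySem.List.sorted lengths (fun y => y) false) e : Nat) : Int) := by
      intro e
      rw [counter_filter_sum lengths (fun k => decide (k ≤ e)), count_le_sorted]
    have htail : ∀ last : Int,
        (((PySem.Dict.counter lengths).items.filter (fun q => q.1 > last)).map (fun q => q.2)).sum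
          = (((PySem.List.sorted lengths (fun y => y) false).length : Nat) : Int)
            - ((count_le (PySem.List.sorted lengths (fun y => y) false) last : Nat) : Int) := by
      intro last
      rw [counter_filter_sum lengths (fun k => decide (k > last)), count_le_sorted,
          PySem.List.length_sorted]
      have hsplit : lengths.countP (fun l => decide (l ≤ last))
          + lengths.countP (fun l => decide (l > last)) = lengths.length := by
        have h := List.length_eq_countP_add_countP (l := lengths) (p := fun l => decide (l ≤ last))
        have hcong : lengths.countP (fun a => decide ¬(decide (a ≤ last) = true))
            = lengths.countP (fun l => decide (l > last)) := by
          apply List.countP_congr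
          intro a _
          by_cases hla : a ≤ last
          · simp [hla, not_lt.mpr hla]
          · simp [hla, not_le.mp hla]
        rw [hcong] at h
        omega
      omega
    simp only [htot, htail]
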